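-- pv_equiv track=rewrite | github.com/radium226/throwable-firefox | app/src/radium226/throwable_firefox/core/profile.py | _hash_url
-- ===== SOURCE A (Python) =====
-- def _hash_url(url: str) -> int:
--     # Mirrors Firefox's hash() SQL function (toolkit/components/places): the low 32 bits
--     # are HashString(url), the next 16 bits are HashString(scheme) & 0xFFFF.
--     golden = 0x9E3779B9
--     mask = 0xFFFFFFFF
--
--     def hash_bytes(data: bytes) -> int:
--         h = 0
--         for b in data:
--             h = (golden * ((((h << 5) | (h >> 27)) & mask) ^ b)) & mask
--         return h
--
--     encoded = url.encode("utf-8")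
--     full_hash = hash_bytes(encoded)
--     colon = encoded.find(b":")
--     if colon > 0:
--         prefix_hash = hash_bytes(encoded[:colon]) & 0xFFFF
--         return (prefix_hash << 32) | full_hash
--     return full_hash
-- ===== SOURCE B (Python) =====
-- def _hash_url(url: str) -> int:
--     # One rolling-hash pass over the bytes; the scheme-prefix hash is the loop
--     # state captured when the index reaches the first ':'.
--     golden = 0x9E3779B9
--     mask = 0xFFFFFFFF
--     encoded = url.encode("utf-8")
--     colon = encoded.find(b":")
--     h = 0
--     prefix = 0
--     for i, b in enumerate(encoded):
--         if i == colon: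
--             prefix = h & 0xFFFF
--         h = (golden * ((((h << 5) | (h >> 27)) & mask) ^ b)) & mask
--     if colon > 0:
--         return (prefix << 32) | h
--     return h
-- ===== Notes on version B (the rewrite author's own statement) =====
-- stated objective: alternative
-- what changed: B hashes the bytes in a single rolling pass, capturing the loop state at the colon index as the scheme-prefix hash, instead of A's two separate hash_bytes passes (full string and prefix slice).
import Mathlib
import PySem

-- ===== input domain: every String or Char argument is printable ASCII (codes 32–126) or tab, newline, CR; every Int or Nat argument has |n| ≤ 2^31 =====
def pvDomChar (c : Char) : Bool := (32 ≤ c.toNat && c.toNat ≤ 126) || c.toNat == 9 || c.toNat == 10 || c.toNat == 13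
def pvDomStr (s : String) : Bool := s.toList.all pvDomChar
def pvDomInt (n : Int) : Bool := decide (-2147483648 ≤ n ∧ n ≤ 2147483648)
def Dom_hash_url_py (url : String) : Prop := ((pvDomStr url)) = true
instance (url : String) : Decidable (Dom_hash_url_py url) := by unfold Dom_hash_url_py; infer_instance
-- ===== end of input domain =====

-- B changes A's two hash_bytes passes into one rolling pass that captures the
-- prefix hash at the colon index (objective: alternative single-pass decomposition).

-- ===== PORT A =====
-- shared byte-hash step (golden-ratio rotate/xor/multiply, masked to 32 bits)
def hbStep (h b : Nat) : Nat :=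
  (0x9E3779B9 * ((((h <<< 5) ||| (h >>> 27)) &&& 0xFFFFFFFF) ^^^ b)) &&& 0xFFFFFFFF

-- A's inner hash_bytes loop
def hashBytes (data : List Nat) : Nat := data.foldl hbStep 0

def hash_url_py (url : String) : Int :=
  -- url.encode("utf-8"): on the ASCII domain the bytes are the char codes
  let encoded : List Nat := url.toList.map Char.toNat
  let fullHash := hashBytes encoded
  -- encoded.find(b":"): on ASCII identical to url.find(":")
  let colon := PySem.Str.find url ":"
  if colon > 0 then
    -- encoded[:colon] with colon > 0 is exactly take colon
    let prefixHash := (hashBytes (encoded.take colon.toNat)) &&& 0xFFFF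
    ((prefixHash <<< 32) ||| fullHash : Nat)
  else
    (fullHash : Nat)

-- ===== PORT B =====
-- B's single loop: state (h, prefix); at index i = colon the current h & 0xFFFF
-- is saved as the prefix hash.
def altLoop (colon : Int) : List Nat → Nat → Nat → Nat → Nat × Nat
  | [], _, h, p => (h, p)
  | b :: rest, i, h, p =>
      let p' := if (i : Int) = colon then h &&& 0xFFFF else p
      altLoop colon rest (i + 1) (hbStep h b) p'

def hash_url_py_alt (url : String) : Int :=
  let encoded : List Nat := url.toList.map Char.toNat
  let colon := PySem.Str.find url ":"
  let hp := altLoop colon encoded 0 0 0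
  if colon > 0 then ((hp.2 <<< 32) ||| hp.1 : Nat)
  else (hp.1 : Nat)

-- ===== PRECONDITION & SPEC =====
def Spec_hash_url_py (url : String) (out : Int) : Prop := out = hash_url_py_alt url
instance (url : String) (out : Int) : Decidable (Spec_hash_url_py url out) := by unfold Spec_hash_url_py; infer_instance

-- ===== CLAIM (what is proved, stated in full; the proofs are below) =====
def Claim_equal_hash_url_py : Prop := ∀ (url : String), Dom_hash_url_py url → Spec_hash_url_py url (hash_url_py url)

-- ===== LEMMAS AND PROOFS =====

theorem altLoop_fst (c : Int) (l : List Nat) (i h p : Nat) :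
    (altLoop c l i h p).1 = l.foldl hbStep h := by
  induction l generalizing i h p with
  | nil => rfl
  | cons b rest ih => simp [altLoop, ih]

theorem altLoop_snd_lt (c : Int) (l : List Nat) (i h p : Nat) (hc : c < (i : Int)) :
    (altLoop c l i h p).2 = p := by
  induction l generalizing i h p with
  | nil => rfl
  | cons b rest ih =>
      have hne : (i : Int) ≠ c := by omega
      simp only [altLoop, hne]
      exact ih (i + 1) _ p (by push_cast; omega)

theorem altLoop_snd (c : Nat) (l : List Nat) (i h p : Nat)
    (h1 : i ≤ c) (h2 : c < i + l.length) :
    (altLoop (c : Int) l i h p).2 = (l.take (c - i)).foldl hbStep h &&& 0xFFFF := by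
  induction l generalizing i h p with
  | nil => simp at h2; omega
  | cons b rest ih =>
      by_cases hic : i = c
      · have h0 : c - i = 0 := by omega
        have hif : ((i : Nat) : Int) = (c : Int) := by exact_mod_cast hic
        simp only [altLoop, if_pos hif, h0, List.take_zero, List.foldl_nil]
        exact altLoop_snd_lt _ _ _ _ _ (by push_cast; omega)
      · have hlt : i < c := lt_of_le_of_ne h1 hic
        have hne : ((i : Nat) : Int) ≠ (c : Int) := by
          intro hh; exact hic (by exact_mod_cast hh)
        simp only [altLoop, if_neg hne]
        rw [ih (i + 1) (hbStep h b) p hlt (by simp at h2 ⊢; omega)]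
        have htake : (b :: rest).take (c - i) = b :: rest.take (c - (i + 1)) := by
          have : c - i = (c - (i + 1)) + 1 := by omega
          simp [this]
        rw [htake, List.foldl_cons]

-- colon ≥ 0 implies it is a valid index (the ':' really occurs there)
theorem find_lt_length (url : String) (hpos : 0 < PySem.Str.find url ":") :
    (PySem.Str.find url ":").toNat < url.toList.length := by
  have hne : PySem.Str.find url ":" ≠ -1 := by omega
  have hinf := (PySem.Str.find_ne_neg_one_iff url ":").mp hne
  have hnn : 0 ≤ PySem.Chars.find url.toList ":".toList := by
    have := PySem.Str.find_eq url ":"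
    rw [PySem.Chars.find_nonneg_iff]
    simpa [PySem.Str.find_eq] using hinf
  have hpre := (PySem.Chars.find_spec hnn).1
  have hlen := hpre.length_le
  have hdrop : (url.toList.drop (PySem.Chars.find url.toList ":".toList).toNat).length
      = url.toList.length - (PySem.Chars.find url.toList ":".toList).toNat := by
    simp
  rw [hdrop] at hlen
  have h1 : (":".toList).length = 1 := by decide
  rw [h1] at hlen
  have heq : PySem.Str.find url ":" = PySem.Chars.find url.toList ":".toList :=
    PySem.Str.find_eq url ":"
  rw [heq] at hpos ⊢
  omega

-- ===== VERDICT (by name: the statement is the Claim_ definition above) =====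
theorem hash_url_py_spec : Claim_equal_hash_url_py := by
  intro url _
  unfold Spec_hash_url_py hash_url_py hash_url_py_alt
  set c := PySem.Str.find url ":" with hc
  by_cases hpos : c > 0
  · simp only [if_pos hpos]
    have hclen : c.toNat < url.toList.length := find_lt_length url (hc ▸ hpos)
    have hcast : ((c.toNat : Nat) : Int) = c := Int.toNat_of_nonneg (by omega)
    have hsnd := altLoop_snd c.toNat (url.toList.map Char.toNat) 0 0 0
      (Nat.zero_le _) (by simpa using hclen)
    rw [hcast] at hsnd
    rw [altLoop_fst, hsnd]
    simp [hashBytes]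
  · simp only [if_neg hpos]
    rw [altLoop_fst]
    rfl
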